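-- pv_equiv track=rewrite | github.com/parkjunhyo/from_checkpoint_to_juniper_policy_migration_ver3 | utils.py | findDefaultzone
-- ===== SOURCE A (Python) =====
-- def findDefaultzone(zone_names_list, netmask_list ):
--    default_zone_name = ""
--    for zone_name in zone_names_list:
--        if "0.0.0.0/0" in netmask_list[zone_name]:
--           default_zone_name = zone_name
--        else:
--           continue
--    return default_zone_name
-- ===== SOURCE B (Python) =====
-- def findDefaultzone(zone_names_list, netmask_list):
--     for zone_name in reversed(zone_names_list):
--         if "0.0.0.0/0" in netmask_list[zone_name]:
--             return zone_name
--     return ""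
-- ===== Notes on version B (the rewrite author's own statement) =====
-- stated objective: simpler
-- what changed: B scans the zone list backwards and returns the first zone whose netmask list contains 0.0.0.0/0 (early exit), instead of A's full forward pass that overwrites an accumulator on every match; Pre_ excludes inputs where some zone name is not a key of netmask_list, on which A raises KeyError.
import Mathlib
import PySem

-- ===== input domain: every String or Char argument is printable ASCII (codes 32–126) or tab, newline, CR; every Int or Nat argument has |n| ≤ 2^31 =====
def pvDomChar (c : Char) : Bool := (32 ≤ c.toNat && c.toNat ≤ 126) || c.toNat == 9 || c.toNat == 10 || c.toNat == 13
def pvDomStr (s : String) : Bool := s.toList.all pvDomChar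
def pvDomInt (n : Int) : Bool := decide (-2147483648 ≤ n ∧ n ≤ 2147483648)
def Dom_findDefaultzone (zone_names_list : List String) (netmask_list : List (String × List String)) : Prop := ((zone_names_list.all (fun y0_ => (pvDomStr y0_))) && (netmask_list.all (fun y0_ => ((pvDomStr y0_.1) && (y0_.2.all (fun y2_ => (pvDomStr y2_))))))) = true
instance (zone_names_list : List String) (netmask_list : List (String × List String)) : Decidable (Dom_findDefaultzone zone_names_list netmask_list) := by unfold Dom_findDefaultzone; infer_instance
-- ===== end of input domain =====

-- One line: B scans the zone list backwards with an early return instead of A's forward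
-- overwrite-on-every-match pass; equal on all inputs where every zone name is a dict key.

-- ===== PORT A =====
-- A: forward fold, accumulator overwritten on every match (getD: Pre_ guarantees the key exists).
def findDefaultzone (zone_names_list : List String) (netmask_list : List (String × List String)) : String :=
  zone_names_list.foldl
    (fun default_zone_name zone_name =>
      if "0.0.0.0/0" ∈ (PySem.Dict.mk netmask_list).getD zone_name []
      then zone_name else default_zone_name) ""

-- ===== PORT B =====
-- B helper: first matching zone in the given list, "" if none.
def fdzFirst (netmask_list : List (String × List String)) : List String → String
  | [] => ""
  | zone_name :: rest =>
      if "0.0.0.0/0" ∈ (PySem.Dict.mk netmask_list).getD zone_name []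
      then zone_name else fdzFirst netmask_list rest

def findDefaultzone_alt (zone_names_list : List String) (netmask_list : List (String × List String)) : String :=
  fdzFirst netmask_list zone_names_list.reverse

-- ===== PRECONDITION & SPEC =====
-- Pre_ excludes inputs where some zone name is missing from the dict: A raises KeyError there.
def Pre_findDefaultzone (zone_names_list : List String) (netmask_list : List (String × List String)) : Prop :=
  ∀ z ∈ zone_names_list, (PySem.Dict.mk netmask_list).contains z = true
instance (zone_names_list : List String) (netmask_list : List (String × List String)) : Decidable (Pre_findDefaultzone zone_names_list netmask_list) := by unfold Pre_findDefaultzone; infer_instance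

def pvWitness_findDefaultzone : List String × (List (String × List String)) :=
  (["trust", "untrust"], [("trust", ["10.0.0.0/8"]), ("untrust", ["0.0.0.0/0"])])

def Spec_findDefaultzone (zone_names_list : List String) (netmask_list : List (String × List String)) (out : String) : Prop := out = findDefaultzone_alt zone_names_list netmask_list
instance (zone_names_list : List String) (netmask_list : List (String × List String)) (out : String) : Decidable (Spec_findDefaultzone zone_names_list netmask_list out) := by unfold Spec_findDefaultzone; infer_instance

-- ===== CLAIM =====
def Claim_equal_findDefaultzone : Prop := ∀ (zone_names_list : List String) (netmask_list : List (String × List String)), Dom_findDefaultzone zone_names_list netmask_list → Pre_findDefaultzone zone_names_list netmask_list → Spec_findDefaultzone zone_names_list netmask_list (findDefaultzone zone_names_list netmask_list)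

-- ===== LEMMAS AND PROOFS =====

-- Generalised first-match with a default accumulator (proof-only helper).
def fdzFirstD (netmask_list : List (String × List String)) (acc : String) : List String → String
  | [] => acc
  | z :: rest =>
      if "0.0.0.0/0" ∈ (PySem.Dict.mk netmask_list).getD z []
      then z else fdzFirstD netmask_list acc rest

theorem fdzFirstD_append_singleton (nl : List (String × List String)) (acc : String)
    (l : List String) (z : String) :
    fdzFirstD nl acc (l ++ [z])
      = fdzFirstD nl (if "0.0.0.0/0" ∈ (PySem.Dict.mk nl).getD z [] then z else acc) l := by
  induction l with
  | nil => simp [fdzFirstD]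
  | cons x xs ih => simp [fdzFirstD, ih]

theorem foldl_eq_fdzFirstD (nl : List (String × List String)) (l : List String) (acc : String) :
    l.foldl (fun a z => if "0.0.0.0/0" ∈ (PySem.Dict.mk nl).getD z [] then z else a) acc
      = fdzFirstD nl acc l.reverse := by
  induction l generalizing acc with
  | nil => simp [fdzFirstD]
  | cons x xs ih =>
      simp only [List.foldl_cons, List.reverse_cons, fdzFirstD_append_singleton]
      exact ih _

theorem fdzFirstD_empty_eq_fdzFirst (nl : List (String × List String)) (l : List String) :
    fdzFirstD nl "" l = fdzFirst nl l := by
  induction l with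
  | nil => rfl
  | cons x xs ih => simp [fdzFirstD, fdzFirst, ih]

-- ===== VERDICT =====
theorem findDefaultzone_spec : Claim_equal_findDefaultzone := by
  intro zl nl _ _
  unfold Spec_findDefaultzone findDefaultzone findDefaultzone_alt
  rw [foldl_eq_fdzFirstD, fdzFirstD_empty_eq_fdzFirst]
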